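-- pv_equiv track=rewrite | github.com/ozp/openclaw-skills | task-tracker-openclaw-skill/scripts/tasks.py | _remove_task_line
-- ===== SOURCE A (Python) =====
-- def _remove_task_line(content: str, raw_line: str) -> str:
--     """Remove a task line and its child/continuation lines."""
--     lines = content.split('\n')
--     try:
--         target_index = lines.index(raw_line)
--     except ValueError:
--         return content
--
--     target_indent = len(raw_line) - len(raw_line.lstrip(' '))
--     remove_until = target_index + 1
--
--     while remove_until < len(lines):
--         line = lines[remove_until]
--
--         if line.strip() == '':
--             lookahead = remove_until + 1
--             while lookahead < len(lines) and lines[lookahead].strip() == '':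
--                 lookahead += 1
--
--             if lookahead < len(lines):
--                 next_line = lines[lookahead]
--                 next_indent = len(next_line) - len(next_line.lstrip(' '))
--                 if next_indent > target_indent:
--                     remove_until += 1
--                     continue
--             break
--
--         indent = len(line) - len(line.lstrip(' '))
--         if indent > target_indent:
--             remove_until += 1
--             continue
--         break
--
--     return '\n'.join(lines[:target_index] + lines[remove_until:])
-- ===== SOURCE B (Python) =====
-- def _remove_task_line(content: str, raw_line: str) -> str:
--     """Remove a task line and its child/continuation lines."""
--     lines = content.split('\n')
--     try:
--         target_index = lines.index(raw_line)
--     except ValueError: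
--         return content
--
--     target_indent = len(raw_line) - len(raw_line.lstrip(' '))
--
--     # boundary: first line after the target that is non-blank and not deeper-indented
--     boundary = len(lines)
--     for i in range(target_index + 1, len(lines)):
--         line = lines[i]
--         if line.strip() != '' and len(line) - len(line.lstrip(' ')) <= target_indent:
--             boundary = i
--             break
--
--     # keep trailing blank lines that sit just before the boundary
--     remove_until = boundary
--     while remove_until > target_index + 1 and lines[remove_until - 1].strip() == '':
--         remove_until -= 1
--
--     return '\n'.join(lines[:target_index] + lines[remove_until:])
-- ===== Notes on version B (the rewrite author's own statement) =====
-- stated objective: alternative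
-- what changed: A's single forward loop with a nested blank-line lookahead (re-scanned for every blank line) is replaced by one forward scan for the first non-blank boundary line at or above the target indent, followed by a backward walk trimming trailing blank lines before that boundary.
import Mathlib
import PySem

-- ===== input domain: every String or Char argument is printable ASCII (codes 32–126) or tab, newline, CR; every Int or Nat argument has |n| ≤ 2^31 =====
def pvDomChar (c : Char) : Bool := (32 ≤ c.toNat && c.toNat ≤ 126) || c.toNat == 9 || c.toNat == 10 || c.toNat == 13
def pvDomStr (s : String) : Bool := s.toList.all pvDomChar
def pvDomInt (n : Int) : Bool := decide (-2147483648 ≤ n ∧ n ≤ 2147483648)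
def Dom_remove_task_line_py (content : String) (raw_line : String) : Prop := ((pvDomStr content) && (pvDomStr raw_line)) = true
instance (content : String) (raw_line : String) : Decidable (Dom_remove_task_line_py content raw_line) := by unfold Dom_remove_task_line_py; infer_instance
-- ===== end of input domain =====

-- B replaces A's forward loop with a nested blank-line lookahead by one boundary scan plus a
-- backward trim of trailing blanks (objective: alternative decomposition; same return value).

-- shared primitive predicates (both Pythons compute these inline):
-- line.strip() == ''  and  len(line) - len(line.lstrip(' '))
def pvBlank (l : List Char) : Bool := PySem.Chars.strip l == []
-- lstrip(' ') (strip-set = the single char ' ') is ported by hand as dropWhile (· == ' '); exact.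
def pvIndent (l : List Char) : Nat := l.length - (l.dropWhile (· == ' ')).length

-- ===== PORT A =====
-- A's inner lookahead: while lookahead < len(lines) and lines[lookahead].strip() == '': lookahead += 1
def pvLookA (lines : List (List Char)) (la : Nat) : Nat :=
  if h : la < lines.length then
    if pvBlank lines[la] then pvLookA lines (la + 1) else la
  else la
termination_by lines.length - la
decreasing_by omega

-- A's outer while loop over remove_until
def pvLoopA (lines : List (List Char)) (target_indent : Nat) (remove_until : Nat) : Nat :=
  if h : remove_until < lines.length then
    let line := lines[remove_until]
    if pvBlank line then
      let lookahead := pvLookA lines (remove_until + 1)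
      if h2 : lookahead < lines.length then
        if pvIndent lines[lookahead] > target_indent then
          pvLoopA lines target_indent (remove_until + 1)
        else remove_until
      else remove_until
    else
      if pvIndent line > target_indent then
        pvLoopA lines target_indent (remove_until + 1)
      else remove_until
  else remove_until
termination_by lines.length - remove_until
decreasing_by all_goals omega

def remove_task_line_py (content : String) (raw_line : String) : String :=
  let lines := PySem.Chars.splitOn content.toList ['\n']
  match PySem.List.index? lines raw_line.toList with
  | none => content
  | some target_index =>
    let target_indent := pvIndent raw_line.toList
    let remove_until := pvLoopA lines target_indent (target_index + 1)
    String.ofList (PySem.Chars.join ['\n'] (lines.take target_index ++ lines.drop remove_until))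

-- ===== PORT B =====
-- B's boundary scan: first i in range(target_index+1, len(lines)) with a non-blank,
-- not-deeper-indented line; else len(lines)
def pvBoundaryB (lines : List (List Char)) (target_indent : Nat) (i : Nat) : Nat :=
  if h : i < lines.length then
    if !pvBlank lines[i] && pvIndent lines[i] ≤ target_indent then i
    else pvBoundaryB lines target_indent (i + 1)
  else lines.length
termination_by lines.length - i
decreasing_by omega

-- B's backward trim: while remove_until > target_index+1 and lines[remove_until-1].strip() == ''
-- (the index is always in range when called from the port; pyGet?.getD makes the recursion total)
def pvBackB (lines : List (List Char)) (target_index : Nat) (remove_until : Nat) : Nat :=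
  if h : target_index + 1 < remove_until then
    if pvBlank ((PySem.List.pyGet? lines ((remove_until : Int) - 1)).getD []) then
      pvBackB lines target_index (remove_until - 1)
    else remove_until
  else remove_until
termination_by remove_until
decreasing_by omega

def remove_task_line_py_alt (content : String) (raw_line : String) : String :=
  let lines := PySem.Chars.splitOn content.toList ['\n']
  match PySem.List.index? lines raw_line.toList with
  | none => content
  | some target_index =>
    let target_indent := pvIndent raw_line.toList
    let boundary := pvBoundaryB lines target_indent (target_index + 1)
    let remove_until := pvBackB lines target_index boundary
    String.ofList (PySem.Chars.join ['\n'] (lines.take target_index ++ lines.drop remove_until))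

-- ===== PRECONDITION & SPEC =====
def Spec_remove_task_line_py (content : String) (raw_line : String) (out : String) : Prop := out = remove_task_line_py_alt content raw_line
instance (content : String) (raw_line : String) (out : String) : Decidable (Spec_remove_task_line_py content raw_line out) := by unfold Spec_remove_task_line_py; infer_instance

-- ===== CLAIM (what is proved, stated in full; the proofs are below) =====
def Claim_equal_remove_task_line_py : Prop := ∀ (content : String) (raw_line : String), Dom_remove_task_line_py content raw_line → Spec_remove_task_line_py content raw_line (remove_task_line_py content raw_line)

-- ===== LEMMAS AND PROOFS =====

-- a line A's loop keeps removing over: blank, or deeper-indented than the target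
def pvKeep (k : Nat) (l : List Char) : Bool := pvBlank l || decide (pvIndent l > k)

-- A's lookahead condition as a predicate on the tail after the current blank line
def pvC (k : Nat) (ls : List (List Char)) : Bool :=
  match ls.dropWhile pvBlank with
  | [] => false
  | x :: _ => decide (pvIndent x > k)

-- how many lines A's loop removes from a suffix
def pvAcnt (k : Nat) : List (List Char) → Nat
  | [] => 0
  | l :: ls =>
    if pvBlank l then (if pvC k ls then 1 + pvAcnt k ls else 0)
    else if pvIndent l > k then 1 + pvAcnt k ls else 0

lemma pvRdropWhile_cons_ne_nil {α : Type} (p : α → Bool) (a : α) (l : List α)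
    (h : List.rdropWhile p l ≠ []) : List.rdropWhile p (a :: l) = a :: List.rdropWhile p l := by
  have h' : ¬ (List.dropWhile p l.reverse).isEmpty = true := by
    simpa [List.rdropWhile, List.isEmpty_iff] using h
  simp [List.rdropWhile, List.dropWhile_append, h']

lemma pvRdropWhile_cons_neg {α : Type} (p : α → Bool) (a : α) (l : List α)
    (h : p a = false) : List.rdropWhile p (a :: l) = a :: List.rdropWhile p l := by
  by_cases hn : List.rdropWhile p l = []
  · have hall : ∀ x ∈ l, p x = true := List.rdropWhile_eq_nil_iff.mp hn
    have : ∀ x ∈ l.reverse, p x = true := by simpa using hall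
    simp [List.rdropWhile, List.dropWhile_append, List.dropWhile_eq_nil_iff.mpr this, h]
  · exact pvRdropWhile_cons_ne_nil p a l hn

lemma pvDropWhile_head_false {α : Type} (p : α → Bool) (l : List α) (x : α) (r : List α)
    (h : l.dropWhile p = x :: r) : p x = false := by
  have := List.head_dropWhile_not p (l := l) (by simp [h])
  simpa [h] using this

lemma pvDropWhile_eq_drop_takeWhile {α : Type} (p : α → Bool) (l : List α) :
    l.drop (l.takeWhile p).length = l.dropWhile p := by
  have h := List.takeWhile_append_dropWhile (p := p) (l := l)
  calc l.drop (l.takeWhile p).length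
      = (l.takeWhile p ++ l.dropWhile p).drop (l.takeWhile p).length := by rw [h]
    _ = l.dropWhile p := List.drop_left

-- the key characterisation: A's removal count is "take while removable, then trim trailing blanks"
lemma pvAcnt_eq (k : Nat) (ls : List (List Char)) :
    pvAcnt k ls = (List.rdropWhile pvBlank (List.takeWhile (pvKeep k) ls)).length := by
  induction ls with
  | nil => simp [pvAcnt]
  | cons l ls ih =>
    by_cases hb : pvBlank l = true
    · have hk : pvKeep k l = true := by simp [pvKeep, hb]
      rw [List.takeWhile_cons_of_pos hk]
      by_cases hc : pvC k ls = true
      · -- the first non-blank line after the blank run is deeper-indented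
        obtain ⟨x, r, hdrop, hx⟩ : ∃ x r, ls.dropWhile pvBlank = x :: r ∧ pvIndent x > k := by
          unfold pvC at hc
          rcases hd : ls.dropWhile pvBlank with _ | ⟨x, r⟩
          · simp [hd] at hc
          · exact ⟨x, r, rfl, by simpa [hd] using hc⟩
        have hxnb : pvBlank x = false := pvDropWhile_head_false pvBlank ls x r hdrop
        have hxmem : x ∈ List.takeWhile (pvKeep k) ls := by
          have hsplit : ls = ls.takeWhile pvBlank ++ x :: r := by
            conv_lhs => rw [← List.takeWhile_append_dropWhile (p := pvBlank) (l := ls)]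
            rw [hdrop]
          have hall : ∀ a ∈ ls.takeWhile pvBlank, pvKeep k a = true := by
            intro a ha
            simp [pvKeep, List.mem_takeWhile_imp ha]
          rw [hsplit, List.takeWhile_append_of_pos hall,
              List.takeWhile_cons_of_pos (by simp [pvKeep, hx])]
          simp
        have hne : List.rdropWhile pvBlank (List.takeWhile (pvKeep k) ls) ≠ [] := by
          intro hnil
          exact absurd (List.rdropWhile_eq_nil_iff.mp hnil x hxmem) (by simp [hxnb])
        rw [pvRdropWhile_cons_ne_nil pvBlank l _ hne]
        simp [pvAcnt, hb, hc, ih]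
        omega
      · -- everything removable after the blank is itself blank: trimming erases it all
        have hallblank : ∀ a ∈ List.takeWhile (pvKeep k) ls, pvBlank a = true := by
          rcases hd : ls.dropWhile pvBlank with _ | ⟨x, r⟩
          · intro a ha
            exact List.dropWhile_eq_nil_iff.mp hd a ((List.takeWhile_sublist _).mem ha)
          · have hxnb : pvBlank x = false := pvDropWhile_head_false pvBlank ls x r hd
            have hxk : pvKeep k x = false := by
              unfold pvC at hc
              simp [hd] at hc
              simp [pvKeep, hxnb]
              omega
            have hsplit : ls = ls.takeWhile pvBlank ++ x :: r := by
              conv_lhs => rw [← List.takeWhile_append_dropWhile (p := pvBlank) (l := ls)]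
              rw [hd]
            have hall : ∀ a ∈ ls.takeWhile pvBlank, pvKeep k a = true := by
              intro a ha
              simp [pvKeep, List.mem_takeWhile_imp ha]
            rw [hsplit, List.takeWhile_append_of_pos hall,
                List.takeWhile_cons_of_neg (by simp [hxk])]
            intro a ha
            simp at ha
            exact List.mem_takeWhile_imp ha
        have : List.rdropWhile pvBlank (l :: List.takeWhile (pvKeep k) ls) = [] := by
          rw [List.rdropWhile_eq_nil_iff]
          intro a ha
          rcases List.mem_cons.mp ha with h1 | h2
          · rw [h1]; exact hb
          · exact hallblank a h2
        simp [pvAcnt, hb, hc, this]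
    · by_cases hi : pvIndent l > k
      · have hk : pvKeep k l = true := by simp [pvKeep, hi]
        rw [List.takeWhile_cons_of_pos hk,
            pvRdropWhile_cons_neg pvBlank l _ (by simpa using hb)]
        simp [pvAcnt, hb, hi, ih]
        omega
      · have hk : pvKeep k l = false := by
          simp [pvKeep, hb]; omega
        rw [List.takeWhile_cons_of_neg (by simp [hk])]
        simp [pvAcnt, hb, hi]

lemma pvLookA_eq (lines : List (List Char)) (la : Nat) (h : la ≤ lines.length) :
    pvLookA lines la = la + (List.takeWhile pvBlank (lines.drop la)).length := by
  induction hfuel : lines.length - la generalizing la with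
  | zero =>
    have hla : la = lines.length := by omega
    rw [pvLookA]
    simp [hla]
  | succ n ih =>
    have hlt : la < lines.length := by omega
    rw [pvLookA, dif_pos hlt, List.drop_eq_getElem_cons hlt]
    by_cases hbl : pvBlank lines[la] = true
    · rw [if_pos hbl, ih (la + 1) (by omega) (by omega), List.takeWhile_cons_of_pos hbl]
      simp; omega
    · rw [if_neg hbl, List.takeWhile_cons_of_neg (by simp [hbl])]
      simp

lemma pvLoopA_eq (lines : List (List Char)) (k ru : Nat) (h : ru ≤ lines.length) :
    pvLoopA lines k ru = ru + pvAcnt k (lines.drop ru) := by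
  induction hfuel : lines.length - ru generalizing ru with
  | zero =>
    have hru : ru = lines.length := by omega
    rw [pvLoopA]
    simp [hru, pvAcnt]
  | succ n ih =>
    have hlt : ru < lines.length := by omega
    have hdrop : lines.drop ru = lines[ru] :: lines.drop (ru + 1) := List.drop_eq_getElem_cons hlt
    rw [pvLoopA, dif_pos hlt, hdrop]
    by_cases hbl : pvBlank lines[ru] = true
    · rw [if_pos hbl]
      have hla : pvLookA lines (ru + 1)
          = ru + 1 + (List.takeWhile pvBlank (lines.drop (ru + 1))).length :=
        pvLookA_eq lines (ru + 1) (by omega)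
      have hlen : (List.takeWhile pvBlank (lines.drop (ru + 1))).length
          ≤ (lines.drop (ru + 1)).length := (List.takeWhile_sublist _).length_le
      have hlslen : (lines.drop (ru + 1)).length = lines.length - (ru + 1) := by simp
      have hdropla : lines.drop (pvLookA lines (ru + 1))
          = (lines.drop (ru + 1)).dropWhile pvBlank := by
        rw [hla]
        have h2 : lines.drop (ru + 1 + (List.takeWhile pvBlank (lines.drop (ru + 1))).length)
            = (lines.drop (ru + 1)).drop (List.takeWhile pvBlank (lines.drop (ru + 1))).length := by
          rw [List.drop_drop]
        rw [h2, pvDropWhile_eq_drop_takeWhile]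
      rcases hd : (lines.drop (ru + 1)).dropWhile pvBlank with _ | ⟨x, r⟩
      · -- lookahead fell off the end: break
        have htw : (List.takeWhile pvBlank (lines.drop (ru + 1))).length
            = (lines.drop (ru + 1)).length := by
          have h3 := List.takeWhile_append_dropWhile (p := pvBlank) (l := lines.drop (ru + 1))
          rw [hd] at h3
          simpa using congrArg List.length h3
        have hge : ¬ pvLookA lines (ru + 1) < lines.length := by
          rw [hla, htw]; omega
        rw [dif_neg hge]
        have hcf : pvC k (lines.drop (ru + 1)) = false := by unfold pvC; simp [hd]
        simp [pvAcnt, hbl, hcf]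
      · have hltla : pvLookA lines (ru + 1) < lines.length := by
          by_contra hcon
          have h4 : lines.drop (pvLookA lines (ru + 1)) = [] :=
            List.drop_eq_nil_of_le (by omega)
          rw [hdropla, hd] at h4
          simp at h4
        have hxla : lines[pvLookA lines (ru + 1)] = x := by
          have h5 := (List.drop_eq_getElem_cons hltla).symm.trans (hdropla.trans hd)
          exact (List.cons_eq_cons.mp h5).1
        rw [dif_pos hltla, hxla]
        have hcv : pvC k (lines.drop (ru + 1)) = decide (pvIndent x > k) := by
          unfold pvC; simp [hd]
        by_cases hxk : pvIndent x > k
        · rw [if_pos hxk, ih (ru + 1) (by omega) (by omega)]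
          have hct : pvC k (lines.drop (ru + 1)) = true := by simp [hcv, hxk]
          simp [pvAcnt, hbl, hct]
          omega
        · rw [if_neg hxk]
          have hcf : pvC k (lines.drop (ru + 1)) = false := by simp [hcv, hxk]
          simp [pvAcnt, hbl, hcf]
    · rw [if_neg hbl]
      by_cases hik : pvIndent lines[ru] > k
      · rw [if_pos hik, ih (ru + 1) (by omega) (by omega)]
        simp [pvAcnt, hbl, hik]
        omega
      · rw [if_neg hik]
        simp [pvAcnt, hbl, hik]

lemma pvBoundaryB_eq (lines : List (List Char)) (k i : Nat) (h : i ≤ lines.length) :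
    pvBoundaryB lines k i = i + (List.takeWhile (pvKeep k) (lines.drop i)).length := by
  induction hfuel : lines.length - i generalizing i with
  | zero =>
    have hi : i = lines.length := by omega
    rw [pvBoundaryB]
    simp [hi]
  | succ n ih =>
    have hlt : i < lines.length := by omega
    rw [pvBoundaryB, dif_pos hlt, List.drop_eq_getElem_cons hlt]
    by_cases hk : pvKeep k lines[i] = true
    · have hcond : (!pvBlank lines[i] && decide (pvIndent lines[i] ≤ k)) = false := by
        simp [pvKeep] at hk
        rcases hk with h1 | h1 <;> simp [h1]
      rw [if_neg (by simp [hcond]), ih (i + 1) (by omega) (by omega),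
          List.takeWhile_cons_of_pos hk]
      simp; omega
    · have hcond : (!pvBlank lines[i] && decide (pvIndent lines[i] ≤ k)) = true := by
        simp [pvKeep] at hk
        simp [hk.1]; omega
      rw [if_pos (by simp_all), List.takeWhile_cons_of_neg (by simp [hk])]
      simp
lemma pvBackB_eq (lines : List (List Char)) (t m : Nat) (h : t + 1 + m ≤ lines.length) :
    pvBackB lines t (t + 1 + m)
      = t + 1 + (List.rdropWhile pvBlank (List.take m (lines.drop (t + 1)))).length := by
  induction m with
  | zero =>
    rw [pvBackB]
    simp
  | succ m ih =>
    have hlt : t + 1 + m < lines.length := by omega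
    have hgetm : (lines.drop (t + 1))[m]'(by simp; omega) = lines[t + 1 + m] := by
      rw [List.getElem_drop]
    have hget : (PySem.List.pyGet? lines ((((t + 1 + (m + 1)) : Nat) : Int) - 1)).getD []
        = lines[t + 1 + m] := by
      have : (((t + 1 + (m + 1)) : Nat) : Int) - 1 = ((t + 1 + m : Nat) : Int) := by push_cast; ring
      rw [this, PySem.List.pyGet?_natCast]
      simp [hlt]
    have htake : List.take (m + 1) (lines.drop (t + 1))
        = List.take m (lines.drop (t + 1)) ++ [lines[t + 1 + m]] := by
      rw [List.take_add_one]
      congr 1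
      rw [List.getElem?_eq_getElem (by simp; omega)]
      simp [hgetm]
    rw [pvBackB, dif_pos (by omega), hget, htake]
    by_cases hbl : pvBlank lines[t + 1 + m] = true
    · rw [if_pos hbl, List.rdropWhile_concat_pos _ _ _ hbl]
      have : t + 1 + (m + 1) - 1 = t + 1 + m := by omega
      rw [this, ih (by omega)]
    · rw [if_neg hbl, List.rdropWhile_concat_neg _ _ _ (by simp [hbl])]
      have : (List.take m (lines.drop (t + 1))).length = m := by simp; omega
      simp [this]

lemma pvMain (lines : List (List Char)) (k t : Nat) (h : t < lines.length) :
    pvLoopA lines k (t + 1) = pvBackB lines t (pvBoundaryB lines k (t + 1)) := by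
  set ls : List (List Char) := lines.drop (t + 1) with hls
  have hlslen : ls.length = lines.length - (t + 1) := by simp [hls]
  have hTlen : (List.takeWhile (pvKeep k) ls).length ≤ ls.length := (List.takeWhile_sublist _).length_le
  rw [pvBoundaryB_eq lines k (t + 1) (by omega), ← hls,
      pvBackB_eq lines t _ (by omega), ← hls,
      pvLoopA_eq lines k (t + 1) (by omega), ← hls, pvAcnt_eq]
  have htk : List.take (List.takeWhile (pvKeep k) ls).length ls = List.takeWhile (pvKeep k) ls :=
    (List.prefix_iff_eq_take.mp (List.takeWhile_prefix _)).symm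
  rw [htk]

-- ===== VERDICT (by name: the statement is the Claim_ definition above) =====
theorem remove_task_line_py_spec : Claim_equal_remove_task_line_py := by
  intro content raw_line _
  unfold Spec_remove_task_line_py remove_task_line_py remove_task_line_py_alt
  cases hidx : PySem.List.index? (PySem.Chars.splitOn content.toList ['\n']) raw_line.toList with
  | none => simp only [hidx]
  | some t =>
    obtain ⟨ht, -, -⟩ := PySem.List.getElem_of_index?_eq_some hidx
    simp only [hidx]
    rw [pvMain _ _ _ ht]
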